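-- pv_equiv track=rewrite | github.com/Bonkahr/Python-Journey | code_wars/bored_codes.py | small_abs
-- ===== SOURCE A (Python) =====
-- def small_abs(n: int) -> int:
--     no_zeros = [n for n in str(abs(n)) if n != '0']
--     zero_counts = str(n).count('0')
--     n_str = sorted([n for n in no_zeros], reverse=False)
--     if zero_counts > 0:
--         inserted = '0' * zero_counts
--         n_str.insert(1, inserted)
--         # n_str.append(inserted)
--     if len(str(n)) == 2 and str(n)[-1] == '0':
--         return n
--     ans = int(''.join(str(n) for n in n_str))
--     return ans if n > 0 else -ans
-- ===== SOURCE B (Python) =====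
-- def small_abs(n: int) -> int:
--     counts = {}
--     for ch in str(abs(n)):
--         counts[ch] = counts.get(ch, 0) + 1
--     zeros = '0' * counts.get('0', 0)
--     lead = ''
--     for d in '123456789':
--         if counts.get(d, 0) > 0:
--             lead = d
--             break
--     if lead == '':
--         s = zeros
--     else:
--         s = lead + zeros + ''.join(d * (counts.get(d, 0) - (d == lead)) for d in '123456789')
--     ans = int(s)
--     return ans if n > 0 else -ans
-- ===== Notes on version B (the rewrite author's own statement) =====
-- stated objective: alternative
-- what changed: B replaces A's filter+comparison-sort+positional-insert string pipeline by a single counting pass into a dict of digit frequencies, from which the minimal arrangement (smallest nonzero digit, all zeros, remaining digits ascending) is reconstructed directly; A's redundant two-character special case is dropped.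
import Mathlib
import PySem

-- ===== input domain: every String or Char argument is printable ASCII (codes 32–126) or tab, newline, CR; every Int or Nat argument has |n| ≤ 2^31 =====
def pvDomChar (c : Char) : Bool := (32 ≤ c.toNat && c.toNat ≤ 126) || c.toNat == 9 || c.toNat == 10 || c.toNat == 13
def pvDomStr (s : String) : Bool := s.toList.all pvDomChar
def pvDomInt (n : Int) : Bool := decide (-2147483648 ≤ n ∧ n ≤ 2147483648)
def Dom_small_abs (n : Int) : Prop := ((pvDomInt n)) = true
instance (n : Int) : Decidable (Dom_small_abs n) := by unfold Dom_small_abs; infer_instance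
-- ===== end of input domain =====

-- B replaces A's sort-then-insert pipeline by a digit-count dictionary from which the minimal
-- arrangement is rebuilt directly (alternative decomposition; same exact return values).


-- ===== PORT A =====
-- Python's 1-char strings (from iterating str(abs(n))) are represented as Char while filtered and
-- sorted (same comparison order), and lifted to List Char ("Python str") elements exactly where the
-- multi-char zeros string is inserted; ''.join is List.flatten.  int() is applied to a nonempty
-- digit string here, so PySem.Int.ofChars? is never none and .getD 0 is unreachable.
def small_abs (n : Int) : Int :=
  let no_zeros : List Char := (PySem.Int.toChars |n|).filter (fun c => c ≠ '0')
  let zero_counts : Int := (PySem.Str.count (PySem.Int.toStr n) "0" : Int)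
  let n_str : List (List Char) := (PySem.List.sorted no_zeros (fun c => c) false).map (fun c => [c])
  let n_str : List (List Char) :=
    if zero_counts > 0 then PySem.List.insert n_str 1 (List.replicate zero_counts.toNat '0') else n_str
  if PySem.Str.len (PySem.Int.toStr n) = 2 ∧ PySem.Str.pyGet? (PySem.Int.toStr n) (-1) = some '0' then n
  else
    let ans : Int := (PySem.Int.ofChars? n_str.flatten).getD 0
    if n > 0 then ans else -ans

-- ===== PORT B =====
-- counts is Source B's dict (Counter built by hand); the for-with-break over '123456789' is find?;
-- '' sentinel for lead becomes the none case.  int() again never fails on the built digit string.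
def small_abs_alt (n : Int) : Int :=
  let counts : PySem.Dict Char Int :=
    (PySem.Int.toChars |n|).foldl (fun d ch => d.insert ch (d.getD ch 0 + 1)) PySem.Dict.empty
  let zeros : List Char := List.replicate (counts.getD '0' 0).toNat '0'
  let s : List Char :=
    match ['1','2','3','4','5','6','7','8','9'].find? (fun d => decide (0 < counts.getD d 0)) with
    | none => zeros
    | some lead =>
        lead :: zeros ++
          ['1','2','3','4','5','6','7','8','9'].flatMap
            (fun d => List.replicate (counts.getD d 0 - (if d = lead then 1 else 0)).toNat d)
  let ans : Int := (PySem.Int.ofChars? s).getD 0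
  if n > 0 then ans else -ans

-- ===== PRECONDITION & SPEC =====
def Spec_small_abs (n : Int) (out : Int) : Prop := out = small_abs_alt n
instance (n : Int) (out : Int) : Decidable (Spec_small_abs n out) := by unfold Spec_small_abs; infer_instance

-- ===== CLAIM (what is proved, stated in full; the proofs are below) =====
def Claim_equal_small_abs : Prop := ∀ (n : Int), Dom_small_abs n → Spec_small_abs n (small_abs n)

-- ===== LEMMAS AND PROOFS =====

-- ---- Nat.toDigits groundwork ----
lemma tdc_append (f : Nat) : ∀ (n : Nat) (l : List Char),
    Nat.toDigitsCore 10 f n l = Nat.toDigitsCore 10 f n [] ++ l := by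
  induction f with
  | zero => intro n l; simp [Nat.toDigitsCore]
  | succ f ih =>
    intro n l
    simp only [Nat.toDigitsCore]
    by_cases h : n / 10 = 0
    · simp [h]
    · simp only [h, if_false]
      rw [ih (n/10) (Nat.digitChar (n % 10) :: l), ih (n/10) [Nat.digitChar (n % 10)]]
      simp

lemma tdc_fuel : ∀ (n f₁ f₂ : Nat), n < f₁ → n < f₂ →
    Nat.toDigitsCore 10 f₁ n [] = Nat.toDigitsCore 10 f₂ n [] := by
  intro n
  induction n using Nat.strong_induction_on with
  | _ n ih =>
    intro f₁ f₂ h1 h2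
    obtain ⟨g₁, rfl⟩ : ∃ g, f₁ = g + 1 := ⟨f₁ - 1, by omega⟩
    obtain ⟨g₂, rfl⟩ : ∃ g, f₂ = g + 1 := ⟨f₂ - 1, by omega⟩
    simp only [Nat.toDigitsCore]
    by_cases h : n / 10 = 0
    · simp [h]
    · simp only [h, if_false]
      rw [tdc_append g₁, tdc_append g₂,
        ih (n/10) (by omega) g₁ g₂ (by omega) (by omega)]

lemma toDigits_rec (m : Nat) :
    Nat.toDigits 10 m =
      if m < 10 then [Nat.digitChar m]
      else Nat.toDigits 10 (m / 10) ++ [Nat.digitChar (m % 10)] := by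
  unfold Nat.toDigits
  conv_lhs => rw [Nat.toDigitsCore]
  by_cases h : m < 10
  · have h0 : m / 10 = 0 := by omega
    simp [h0, h, Nat.mod_eq_of_lt h]
  · have h10 : ¬ m / 10 = 0 := by omega
    simp only [h10, if_false, if_neg h]
    rw [tdc_append m, tdc_fuel (m/10) m (m/10 + 1) (by omega) (by omega)]

lemma toDigits_ne_nil (m : Nat) : Nat.toDigits 10 m ≠ [] := by
  rw [toDigits_rec]; split_ifs <;> simp

lemma digitChar_mem (k : Nat) (h : k < 10) :
    Nat.digitChar k ∈ ['0','1','2','3','4','5','6','7','8','9'] := by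
  interval_cases k <;> decide

lemma toDigits_all_digits (m : Nat) :
    ∀ c ∈ Nat.toDigits 10 m, c ∈ ['0','1','2','3','4','5','6','7','8','9'] := by
  induction m using Nat.strong_induction_on with
  | _ m ih =>
    intro c hc
    rw [toDigits_rec] at hc
    by_cases h : m < 10
    · rw [if_pos h] at hc; simp at hc; subst hc; exact digitChar_mem m h
    · rw [if_neg h] at hc
      rcases List.mem_append.1 hc with h1 | h1
      · exact ih (m/10) (by omega) c h1
      · simp at h1; subst h1; exact digitChar_mem _ (Nat.mod_lt _ (by omega))

lemma digitChar_eq_zero_iff (k : Nat) (h : k < 10) : Nat.digitChar k = '0' ↔ k = 0 := by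
  interval_cases k <;> decide

lemma toDigits_small (m : Nat) (h : m < 10) : Nat.toDigits 10 m = [Nat.digitChar m] := by
  rw [toDigits_rec]; simp [h]

lemma toDigits_two (m : Nat) (h1 : 10 ≤ m) (h2 : m < 100) :
    Nat.toDigits 10 m = [Nat.digitChar (m / 10), Nat.digitChar (m % 10)] := by
  rw [toDigits_rec, if_neg (by omega), toDigits_small (m / 10) (by omega)]; rfl

lemma toDigits_ge2 (m : Nat) (h : 10 ≤ m) : 2 ≤ (Nat.toDigits 10 m).length := by
  rw [toDigits_rec, if_neg (by omega)]
  have := List.length_pos_of_ne_nil (toDigits_ne_nil (m/10))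
  simp; omega

lemma toDigits_big (m : Nat) (h : 100 ≤ m) : 3 ≤ (Nat.toDigits 10 m).length := by
  rw [toDigits_rec, if_neg (by omega)]
  have := toDigits_ge2 (m/10) (by omega)
  simp; omega

lemma toChars_abs (n : Int) : PySem.Int.toChars |n| = Nat.toDigits 10 n.natAbs := by
  simp only [PySem.Int.toChars, if_neg (not_lt.mpr (abs_nonneg n))]
  rw [Int.abs_eq_natAbs, Int.toNat_natCast]

lemma toChars_cases (n : Int) :
    PySem.Int.toChars n =
      if n < 0 then '-' :: Nat.toDigits 10 n.natAbs else Nat.toDigits 10 n.natAbs := by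
  simp only [PySem.Int.toChars]
  by_cases h : n < 0
  · simp [h]
  · simp only [h, if_false]
    congr 1
    omega

-- ---- str.count with a single-char needle; the canonical smallest arrangement ----
lemma count_go_single (a : Char) : ∀ (l : List Char) (fuel acc : Nat), l.length ≤ fuel →
    PySem.Chars.count.go [a] fuel l acc = acc + l.count a := by
  intro l
  induction l with
  | nil => intro fuel acc h; cases fuel <;> simp [PySem.Chars.count.go]
  | cons x t ih =>
    intro fuel acc h
    cases fuel with
    | zero => simp at h
    | succ f =>
      rw [PySem.Chars.count.go]
      by_cases hax : a = x
      · subst hax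
        simp only [List.isPrefixOf, if_pos]
        simp only [List.length_cons] at h
        rw [show [a].length = 1 from rfl, List.drop_one, List.tail_cons,
          ih f (acc + 1) (by omega)]
        simp [List.count_cons]
        omega
      · have hp : [a].isPrefixOf (x :: t) = false := by
          simp [List.isPrefixOf]; exact fun hh => hax (by simpa using hh)
        simp only [hp, if_false, Bool.false_eq_true]
        rw [ih f acc (by simpa using Nat.le_of_succ_le_succ h)]
        simp [List.count_cons]
        exact fun h' => hax h'.symm

lemma count_single (s : List Char) (a : Char) : PySem.Chars.count s [a] = s.count a := by
  rw [PySem.Chars.count]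
  simp only [List.isEmpty_cons, if_false, Bool.false_eq_true]
  rw [count_go_single a s s.length 0 le_rfl]
  simp

def canonOf (s : List Char) : List Char :=
  ['1','2','3','4','5','6','7','8','9'].flatMap (fun c => List.replicate (s.count c) c)

lemma pairwise_flatMap_replicate (ks : List Char) (f : Char → Nat)
    (hk : ks.Pairwise (· ≤ ·)) :
    (ks.flatMap fun c => List.replicate (f c) c).Pairwise (· ≤ ·) := by
  induction ks with
  | nil => simp
  | cons k t ih =>
    rw [List.pairwise_cons] at hk
    simp only [List.flatMap_cons]
    rw [List.pairwise_append]
    refine ⟨?_, ih hk.2, ?_⟩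
    · exact List.pairwise_replicate.mpr (Or.inr le_rfl)
    · intro x hx y hy
      rw [List.eq_of_mem_replicate hx]
      rcases List.mem_flatMap.1 hy with ⟨d, hd, hyd⟩
      rw [List.eq_of_mem_replicate hyd]
      exact hk.1 d hd

lemma sorted_filter_eq_canon (s : List Char)
    (hd : ∀ c ∈ s, c ∈ ['0','1','2','3','4','5','6','7','8','9']) :
    PySem.List.sorted (s.filter (fun c => c ≠ '0')) (fun c => c) false = canonOf s := by
  apply PySem.List.sorted_id_eq_of_perm_of_pairwise
  · rw [List.perm_iff_count]
    intro c
    by_cases h0 : c ∈ ['0','1','2','3','4','5','6','7','8','9']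
    · fin_cases h0 <;>
        simp [canonOf, List.count_filter, List.count_replicate]
      exact (List.count_eq_zero.2 (fun hm => by simpa using List.of_mem_filter hm)).symm
    · have hs : s.count c = 0 := List.count_eq_zero.2 (fun hc => h0 (hd c hc))
      have hf : (s.filter (fun c => c ≠ '0')).count c = 0 := by
        rw [List.count_eq_zero] at hs ⊢
        exact fun hc => hs (List.mem_of_mem_filter hc)
      simp only [canonOf, hf]
      simp only [List.count_flatMap, List.count_replicate]
      simp
      refine ⟨?_,?_,?_,?_,?_,?_,?_,?_,?_⟩ <;> rw [List.count_replicate] <;>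
        split_ifs with h <;>
        first
        | rfl
        | (obtain rfl := beq_iff_eq.mp h; exact hs)
  · unfold canonOf
    exact pairwise_flatMap_replicate _ _ (by decide)

lemma find_build (f : Char → Int) : ∀ (ks : List Char), ks.Nodup →
    (match ks.find? (fun c => decide (0 < f c)) with
     | none => ([] : List Char)
     | some c => c :: ks.flatMap (fun d => List.replicate (f d - (if d = c then 1 else 0)).toNat d))
    = ks.flatMap (fun d => List.replicate (f d).toNat d) := by
  intro ks
  induction ks with
  | nil => simp
  | cons k t ih =>
    intro hnd
    rw [List.nodup_cons] at hnd
    by_cases hk : 0 < f k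
    · rw [List.find?_cons_of_pos (by simpa using hk)]
      simp only [List.flatMap_cons, if_pos rfl]
      have h2 : t.flatMap (fun d => List.replicate (f d - if d = k then 1 else 0).toNat d)
          = t.flatMap (fun d => List.replicate (f d).toNat d) := by
        apply List.flatMap_congr
        intro d hd
        rw [if_neg (fun hdk => hnd.1 (by rw [← hdk]; exact hd))]
        simp
      rw [h2, show (f k).toNat = (f k - 1).toNat + 1 by omega, List.replicate_succ]
      simp
    · rw [List.find?_cons_of_neg (by simpa using hk)]
      have hrep : List.replicate (f k).toNat k = [] := by
        rw [List.replicate_eq_nil_iff]; omega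
      cases hfind : t.find? (fun c => decide (0 < f c)) with
      | none =>
        have := ih hnd.2
        rw [hfind] at this
        simp only [List.flatMap_cons, hrep, List.nil_append]
        exact this
      | some c =>
        have := ih hnd.2
        rw [hfind] at this
        have hkc : ¬ k = c := fun h => hnd.1 (h ▸ List.mem_of_find?_eq_some hfind)
        simp only [List.flatMap_cons, hrep, List.nil_append]
        rw [if_neg hkc, show (f k - 0).toNat = 0 by omega]
        simpa using this

def canonStr (s : List Char) : List Char :=
  match canonOf s with
  | [] => List.replicate (s.count '0') '0'
  | c :: rest => c :: List.replicate (s.count '0') '0' ++ rest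

lemma zc_eq (n : Int) :
    PySem.Str.count (PySem.Int.toStr n) "0" = (Nat.toDigits 10 n.natAbs).count '0' := by
  rw [PySem.Str.count_eq]
  rw [show (PySem.Int.toStr n).toList = PySem.Int.toChars n from PySem.Int.toList_toStr n]
  rw [show ("0" : String).toList = ['0'] from rfl, count_single, toChars_cases]
  split_ifs with h
  · simp [List.count_cons]
  · rfl

lemma canonOf_perm (s : List Char)
    (hd : ∀ c ∈ s, c ∈ ['0','1','2','3','4','5','6','7','8','9']) :
    (canonOf s).Perm (s.filter (fun c => c ≠ '0')) := by
  rw [← sorted_filter_eq_canon s hd]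
  exact PySem.List.sorted_perm _ _ _

lemma B_reduces (n : Int) :
    small_abs_alt n =
      (if n > 0 then ((PySem.Int.ofChars? (canonStr (Nat.toDigits 10 n.natAbs))).getD 0)
       else -((PySem.Int.ofChars? (canonStr (Nat.toDigits 10 n.natAbs))).getD 0)) := by
  have hds := toChars_abs n
  set ds := Nat.toDigits 10 n.natAbs with hdsdef
  show (let counts : PySem.Dict Char Int := (PySem.Int.toChars |n|).foldl
          (fun d ch => d.insert ch (d.getD ch 0 + 1)) PySem.Dict.empty
        let zeros : List Char := List.replicate (counts.getD '0' 0).toNat '0'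
        let s : List Char :=
          match ['1','2','3','4','5','6','7','8','9'].find? (fun d => decide (0 < counts.getD d 0)) with
          | none => zeros
          | some lead =>
              lead :: zeros ++
                ['1','2','3','4','5','6','7','8','9'].flatMap
                  (fun d => List.replicate (counts.getD d 0 - (if d = lead then 1 else 0)).toNat d)
        let ans : Int := (PySem.Int.ofChars? s).getD 0
        if n > 0 then ans else -ans) = _
  rw [hds]
  have hcnt : ∀ c, ((ds.foldl (fun d ch => d.insert ch (d.getD ch 0 + 1))
      PySem.Dict.empty).getD c 0) = (ds.count c : Int) := by
    intro c
    rw [PySem.Dict.foldl_insert_getD_add_one_eq_counter, PySem.Dict.getD_counter]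
  simp only [hcnt, Int.toNat_natCast]
  have hfb := find_build (fun c => (ds.count c : Int)) ['1','2','3','4','5','6','7','8','9'] (by decide)
  have hcanon : (['1','2','3','4','5','6','7','8','9'].flatMap
      (fun d => List.replicate ((ds.count d : Int)).toNat d)) = canonOf ds := by
    simp [canonOf]
  rw [hcanon] at hfb
  cases hfind : ['1','2','3','4','5','6','7','8','9'].find?
      (fun d => decide (0 < ((ds.count d : Int)))) with
  | none =>
    rw [hfind] at hfb
    simp only []
    rw [canonStr, ← hfb]
  | some lead =>
    rw [hfind] at hfb
    simp only []
    rw [canonStr, ← hfb]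

lemma flatten_map_singleton (l : List Char) : (l.map (fun c => [c])).flatten = l := by
  induction l with
  | nil => rfl
  | cons x t ih => simp [ih]

lemma A_reduces (n : Int)
    (hc : ¬ (PySem.Str.len (PySem.Int.toStr n) = 2 ∧
             PySem.Str.pyGet? (PySem.Int.toStr n) (-1) = some '0')) :
    small_abs n =
      (if n > 0 then ((PySem.Int.ofChars? (canonStr (Nat.toDigits 10 n.natAbs))).getD 0)
       else -((PySem.Int.ofChars? (canonStr (Nat.toDigits 10 n.natAbs))).getD 0)) := by
  have hds := toChars_abs n
  set ds := Nat.toDigits 10 n.natAbs with hdsdef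
  have hdig := toDigits_all_digits n.natAbs
  rw [← hdsdef] at hdig
  have hne : ds ≠ [] := hdsdef ▸ toDigits_ne_nil n.natAbs
  show (let no_zeros : List Char := (PySem.Int.toChars |n|).filter (fun c => c ≠ '0')
        let zero_counts : Int := (PySem.Str.count (PySem.Int.toStr n) "0" : Int)
        let n_str : List (List Char) :=
          (PySem.List.sorted no_zeros (fun c => c) false).map (fun c => [c])
        let n_str : List (List Char) :=
          if zero_counts > 0 then
            PySem.List.insert n_str 1 (List.replicate zero_counts.toNat '0') else n_str
        if PySem.Str.len (PySem.Int.toStr n) = 2 ∧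
            PySem.Str.pyGet? (PySem.Int.toStr n) (-1) = some '0' then n
        else
          let ans : Int := (PySem.Int.ofChars? n_str.flatten).getD 0
          if n > 0 then ans else -ans) = _
  rw [hds, zc_eq n, ← hdsdef]
  simp only [if_neg hc]
  rw [sorted_filter_eq_canon ds hdig]
  suffices hjoin :
      (if ((ds.count '0' : Int)) > 0 then
          PySem.List.insert ((canonOf ds).map (fun c => [c])) 1
            (List.replicate ((ds.count '0' : Int)).toNat '0')
        else (canonOf ds).map (fun c => [c])).flatten = canonStr ds by
    rw [hjoin]
  by_cases hzc : ds.count '0' = 0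
  · rw [if_neg (by omega)]
    rw [flatten_map_singleton]
    rw [canonStr]
    cases hcan : canonOf ds with
    | nil =>
      exfalso
      have hperm := canonOf_perm ds hdig
      rw [hcan] at hperm
      have hfilter : ds.filter (fun c => c ≠ '0') = [] := (List.Perm.nil_eq hperm).symm
      obtain ⟨c, hcmem⟩ := List.exists_mem_of_ne_nil ds hne
      have : c = '0' := by
        by_contra hcne
        have hmem : c ∈ ds.filter (fun c => c ≠ '0') := List.mem_filter.2 ⟨hcmem, by simpa using hcne⟩
        rw [hfilter] at hmem
        simp at hmem
      subst this
      have : 0 < ds.count '0' := List.count_pos_iff.2 hcmem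
      omega
    | cons c rest => rw [hzc]; rfl
  · rw [if_pos (by positivity)]
    rw [Int.toNat_natCast]
    cases hcan : canonOf ds with
    | nil =>
      rw [canonStr, hcan]
      simp [PySem.List.insert]
    | cons c rest =>
      rw [canonStr, hcan]
      rw [PySem.List.insert_ofNat _ 1 _ (by simp)]
      simp [flatten_map_singleton]

lemma cond_cases (n : Int)
    (hc : PySem.Str.len (PySem.Int.toStr n) = 2 ∧
          PySem.Str.pyGet? (PySem.Int.toStr n) (-1) = some '0') :
    n = 10 ∨ n = 20 ∨ n = 30 ∨ n = 40 ∨ n = 50 ∨ n = 60 ∨ n = 70 ∨ n = 80 ∨ n = 90 := by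
  obtain ⟨hlen, hget⟩ := hc
  have hlen' : ((PySem.Int.toChars n).length : Int) = 2 := by
    simpa [PySem.Int.toList_toStr] using hlen
  have hget' : (PySem.Int.toChars n).getLast? = some '0' := by
    rw [show PySem.Str.pyGet? (PySem.Int.toStr n) (-1)
          = PySem.List.pyGet? (PySem.Int.toChars n) (-1) by
        simp [PySem.Int.toList_toStr]] at hget
    rwa [PySem.List.pyGet?_neg_one] at hget
  rw [toChars_cases n] at hlen' hget'
  by_cases hneg : n < 0
  · exfalso
    rw [if_pos hneg] at hlen' hget'
    have h1 : (Nat.toDigits 10 n.natAbs).length = 1 := by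
      simp at hlen'; omega
    have hsmall : n.natAbs < 10 := by
      by_contra hbig
      have := toDigits_ge2 n.natAbs (by omega)
      omega
    rw [toDigits_small n.natAbs hsmall] at hget'
    simp at hget'
    rw [digitChar_eq_zero_iff n.natAbs hsmall] at hget'
    omega
  · rw [if_neg hneg] at hlen' hget'
    have h2 : (Nat.toDigits 10 n.natAbs).length = 2 := by omega
    have hge : 10 ≤ n.natAbs := by
      by_contra hlt
      rw [toDigits_small n.natAbs (by omega)] at h2
      simp at h2
    have hlt : n.natAbs < 100 := by
      by_contra hbig
      have := toDigits_big n.natAbs (by omega)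
      omega
    rw [toDigits_two n.natAbs hge hlt] at hget'
    simp at hget'
    rw [digitChar_eq_zero_iff (n.natAbs % 10) (Nat.mod_lt _ (by omega))] at hget'
    omega

-- ===== VERDICT (by name: the statement is the Claim_ definition above) =====
theorem small_abs_spec : Claim_equal_small_abs := by
  intro n _
  unfold Spec_small_abs
  by_cases hc : PySem.Str.len (PySem.Int.toStr n) = 2 ∧
      PySem.Str.pyGet? (PySem.Int.toStr n) (-1) = some '0'
  · rcases cond_cases n hc with h | h | h | h | h | h | h | h | h <;> subst h <;> decide
  · rw [A_reduces n hc, B_reduces n]
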